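-- pv_equiv track=rewrite | github.com/dannyInc/ECE448-CS440 | mp4-code/starter_code/viterbi_3.py | get_hapax
-- ===== SOURCE A (Python) =====
-- def get_hapax(tag_word_table):
--     # word:tag, used to record unique hapax words
--     # if a word appears once again, lookup this dict, find its previous tag, and delete the word from hapax set
--     unique_hapax = dict()
--     # tag:[word], resulting hapax_set
--     unique_hapax_list = []
--     hapax_set = dict()
--     hapax_count = dict()
--     for tag in tag_word_table.keys():
--         hapax_list = []
--         for word in tag_word_table[tag].keys():
--             if tag_word_table[tag][word] == 1:
--                 if word not in unique_hapax:
--                     unique_hapax[word] = tag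
--                     hapax_list.append(word)
--                 else:
--                     # remove word from hapax_set if appeared once before
--                     if word in hapax_set[unique_hapax[word]]:
--                         hapax_set[unique_hapax[word]].remove(word)
--         hapax_set[tag] = hapax_list
--
--     for tag in hapax_set.keys():
--         hapax_count[tag] = len(hapax_set[tag])
--
--     return hapax_set, hapax_count
-- ===== SOURCE B (Python) =====
-- def get_hapax(tag_word_table):
--     # One pass recording each hapax word's first tag and whether it was seen
--     # as a hapax again later; then rebuild the per-tag lists in order.
--     first = {}
--     dead = set()
--     for tag, words in tag_word_table.items():
--         for word, cnt in words.items():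
--             if cnt == 1:
--                 if word in first:
--                     dead.add(word)
--                 else:
--                     first[word] = tag
--     hapax_set = {
--         tag: [w for w, c in words.items()
--               if c == 1 and first[w] == tag and w not in dead]
--         for tag, words in tag_word_table.items()
--     }
--     hapax_count = {tag: len(ws) for tag, ws in hapax_set.items()}
--     return hapax_set, hapax_count
-- ===== Notes on version B (the rewrite author's own statement) =====
-- stated objective: alternative
-- what changed: A deletes each repeated hapax word from the earlier tag's already-built list (list scan + list.remove inside the loop); B makes one pass recording each hapax word's first tag and a set of words seen as hapax again, then rebuilds every tag's list and count in a second ordered pass with no list mutation.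
import Mathlib
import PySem

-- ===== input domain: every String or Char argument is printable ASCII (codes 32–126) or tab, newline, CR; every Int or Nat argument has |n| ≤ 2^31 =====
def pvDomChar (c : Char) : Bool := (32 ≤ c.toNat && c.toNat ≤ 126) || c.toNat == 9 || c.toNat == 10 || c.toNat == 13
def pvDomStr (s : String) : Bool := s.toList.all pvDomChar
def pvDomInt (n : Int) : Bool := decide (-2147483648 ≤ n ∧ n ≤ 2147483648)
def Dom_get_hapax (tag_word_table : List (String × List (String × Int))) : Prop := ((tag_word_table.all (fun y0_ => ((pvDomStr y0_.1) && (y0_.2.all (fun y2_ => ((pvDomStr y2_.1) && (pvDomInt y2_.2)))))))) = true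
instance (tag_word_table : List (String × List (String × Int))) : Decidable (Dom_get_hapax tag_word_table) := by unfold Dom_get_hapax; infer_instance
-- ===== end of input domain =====

-- B replaces A's per-word backward removal (list scan + list.remove into earlier
-- tags' lists) by one first-tag/repeated-word pass followed by an ordered rebuild
-- of every tag's list, with no list mutation (objective: alternative).

-- ===== PORT A =====
-- inner loop body of A: 'for word in tag_word_table[tag].keys(): …'
-- state is (unique_hapax, hapax_set, hapax_list)
def ghA_step (inner : PySem.Dict String Int) (tag : String)
    (st : PySem.Dict String String × PySem.Dict String (List String) × List String)
    (word : String) :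
    PySem.Dict String String × PySem.Dict String (List String) × List String :=
  if inner.getD word 0 == 1 then  -- tag_word_table[tag][word] == 1 (word ∈ keys, so getD is exact)
    if !(st.1.contains word) then
      (st.1.insert word tag, st.2.1, st.2.2 ++ [word])
    else
      let t0 := st.1.getD word ""      -- unique_hapax[word]: present here (guarded by the contains test)
      let lst := (st.2.1).getD t0 []   -- hapax_set[unique_hapax[word]]: present on every state A reaches
      if lst.contains word then
        (st.1, (st.2.1).insert t0 ((PySem.List.remove? lst word).getD []), st.2.2)  -- .remove: guarded, so remove? = some _
      else st
  else st

def get_hapax (tag_word_table : List (String × List (String × Int))) :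
    (List (String × List String)) × (List (String × Int)) :=
  -- the Python argument is a dict of dicts
  let T : PySem.Dict String (PySem.Dict String Int) :=
    PySem.Dict.ofList (tag_word_table.map (fun p => (p.1, PySem.Dict.ofList p.2)))
  let uhhs :=
    T.keys.foldl (fun st tag =>
      let r := (T.getD tag PySem.Dict.empty).keys.foldl
                 (ghA_step (T.getD tag PySem.Dict.empty) tag) (st.1, st.2, ([] : List String))
      (r.1, (r.2.1).insert tag r.2.2))
      ((PySem.Dict.empty : PySem.Dict String String),
       (PySem.Dict.empty : PySem.Dict String (List String)))
  let hs := uhhs.2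
  let hc := hs.keys.foldl (fun hc tag => hc.insert tag ((hs.getD tag []).length : Int))
              (PySem.Dict.empty : PySem.Dict String Int)
  (hs.items, hc.items)

-- ===== PORT B =====
def get_hapax_alt (tag_word_table : List (String × List (String × Int))) :
    (List (String × List String)) × (List (String × Int)) :=
  let T : PySem.Dict String (PySem.Dict String Int) :=
    PySem.Dict.ofList (tag_word_table.map (fun p => (p.1, PySem.Dict.ofList p.2)))
  -- pass 1: first tag of each hapax word, plus the set of words hapax under several tags
  let fd :=
    T.items.foldl (fun (fd : PySem.Dict String String × PySem.Set String) tw =>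
      tw.2.items.foldl (fun fd wc =>
        if wc.2 == 1 then
          if fd.1.contains wc.1 then (fd.1, PySem.Set.add fd.2 wc.1)
          else (fd.1.insert wc.1 tw.1, fd.2)
        else fd) fd)
      ((PySem.Dict.empty : PySem.Dict String String), (PySem.Set.empty : PySem.Set String))
  -- pass 2: rebuild each tag's list in order
  let hs := T.items.map (fun tw =>
      (tw.1, (tw.2.items.filter
                (fun wc => wc.2 == 1 && fd.1.getD wc.1 "" == tw.1 && !(PySem.Set.contains fd.2 wc.1))).map
             Prod.fst))
  (hs, hs.map (fun p => (p.1, (p.2.length : Int))))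

-- ===== PRECONDITION & SPEC =====
def Spec_get_hapax (tag_word_table : List (String × List (String × Int))) (out : (List (String × List String)) × (List (String × Int))) : Prop := out = get_hapax_alt tag_word_table
instance (tag_word_table : List (String × List (String × Int))) (out : (List (String × List String)) × (List (String × Int))) : Decidable (Spec_get_hapax tag_word_table out) := by unfold Spec_get_hapax; infer_instance

-- ===== CLAIM (what is proved, stated in full; the proofs are below) =====
def Claim_equal_get_hapax : Prop := ∀ (tag_word_table : List (String × List (String × Int))), Dom_get_hapax tag_word_table → Spec_get_hapax tag_word_table (get_hapax tag_word_table)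

-- ===== LEMMAS AND PROOFS =====

-- hapax words of one tag, in key order
def hapW (d : PySem.Dict String Int) : List String :=
  (d.items.filter (fun wc => wc.2 == 1)).map Prod.fst

-- A's inner step, specialised to a hapax word (the count test already passed)
def stepW (tag : String)
    (st : PySem.Dict String String × PySem.Dict String (List String) × List String)
    (w : String) :
    PySem.Dict String String × PySem.Dict String (List String) × List String :=
  if !(st.1.contains w) then (st.1.insert w tag, st.2.1, st.2.2 ++ [w])
  else
    let t0 := st.1.getD w ""
    let lst := (st.2.1).getD t0 []
    if lst.contains w then
      (st.1, (st.2.1).insert t0 ((PySem.List.remove? lst w).getD []), st.2.2)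
    else st

-- A's outer step over the (tag, hapax-words) table
def stepT (st : PySem.Dict String String × PySem.Dict String (List String))
    (tws : String × List String) :
    PySem.Dict String String × PySem.Dict String (List String) :=
  let r := tws.2.foldl (stepW tws.1) (st.1, st.2, ([] : List String))
  (r.1, (r.2.1).insert tws.1 r.2.2)

def afold (L : List (String × List String)) :
    PySem.Dict String String × PySem.Dict String (List String) :=
  L.foldl stepT ((PySem.Dict.empty : PySem.Dict String String),
                 (PySem.Dict.empty : PySem.Dict String (List String)))

-- B's pass-1 step, specialised to a hapax word
def step1 (tag : String) (fd : PySem.Dict String String × PySem.Set String) (w : String) :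
    PySem.Dict String String × PySem.Set String :=
  if fd.1.contains w then (fd.1, PySem.Set.add fd.2 w) else (fd.1.insert w tag, fd.2)

def pass1 (L : List (String × List String)) : PySem.Dict String String × PySem.Set String :=
  L.foldl (fun fd tw => tw.2.foldl (step1 tw.1) fd)
    ((PySem.Dict.empty : PySem.Dict String String), (PySem.Set.empty : PySem.Set String))

def hcond (f : PySem.Dict String String) (d : PySem.Set String) (t w : String) : Bool :=
  f.getD w "" == t && !(PySem.Set.contains d w)

def model (L : List (String × List String)) : List (String × List String) :=
  L.map (fun tw => (tw.1, tw.2.filter (hcond (pass1 L).1 (pass1 L).2 tw.1)))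

-- small toolbox -------------------------------------------------------------

theorem keys_eq_items_map {κ ν : Type} [BEq κ] (d : PySem.Dict κ ν) :
    d.keys = d.items.map Prod.fst := by
  rfl

theorem contains_add_eq (s : PySem.Set String) (w x : String) :
    PySem.Set.contains (PySem.Set.add s w) x = (PySem.Set.contains s x || x == w) := by
  rw [Bool.eq_iff_iff, Bool.or_eq_true_iff]
  simp [PySem.Set.mem_add]

theorem mem_items_foldl_insert {κ ν : Type} [BEq κ] [LawfulBEq κ]
    (l : List (κ × ν)) (d : PySem.Dict κ ν) (p : κ × ν)
    (h : p ∈ (l.foldl (fun d q => d.insert q.1 q.2) d).items) : p ∈ d.items ∨ p ∈ l := by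
  induction l generalizing d with
  | nil => exact Or.inl h
  | cons q t ih =>
    rcases ih _ h with h' | h'
    · rcases (PySem.Dict.mem_items_insert _ _ _ _).mp h' with h'' | h''
      · rw [h'']; right; exact List.mem_cons.mpr (Or.inl rfl)
      · left; exact h''.1
    · right; exact List.mem_cons_of_mem _ h' 

theorem mem_items_ofList {κ ν : Type} [BEq κ] [LawfulBEq κ] (l : List (κ × ν)) (p : κ × ν)
    (h : p ∈ (PySem.Dict.ofList l).items) : p ∈ l := by
  have : PySem.Dict.ofList l = l.foldl (fun d q => d.insert q.1 q.2) PySem.Dict.empty := rfl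
  rw [this] at h
  rcases mem_items_foldl_insert l _ p h with h' | h'
  · simp [PySem.Dict.empty] at h'
  · exact h' 

theorem snd_unique {α β : Type} (L : List (α × β)) (h : (L.map Prod.fst).Nodup)
    {t : α} {vs vs' : β} (h1 : (t, vs) ∈ L) (h2 : (t, vs') ∈ L) : vs = vs' := by
  induction L with
  | nil => simp at h1
  | cons a t ih =>
    simp only [List.map_cons, List.nodup_cons] at h
    rcases List.mem_cons.mp h1 with e1 | h1' <;> rcases List.mem_cons.mp h2 with e2 | h2'
    · rw [← e1] at e2; exact (Prod.ext_iff.mp e2).2.symm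
    · exfalso; apply h.1; rw [← e1]
      simpa using List.mem_map_of_mem (f := Prod.fst) h2'
    · exfalso; apply h.1; rw [← e2]
      simpa using List.mem_map_of_mem (f := Prod.fst) h1' 
    · exact ih h.2 h1' h2' 

theorem hapW_nodup (d : PySem.Dict String Int) (h : d.keys.Nodup) : (hapW d).Nodup := by
  unfold hapW
  rw [keys_eq_items_map] at h
  exact h.sublist (List.filter_sublist.map _)

-- port-to-model bridges ------------------------------------------------------

theorem haps_eq (d : PySem.Dict String Int) (h : d.keys.Nodup) :
    d.keys.filter (fun w => d.getD w 0 == 1) = hapW d := by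
  unfold hapW
  rw [keys_eq_items_map, List.filter_map]
  congr 1
  apply List.filter_congr
  intro wc hwc
  have hmem : (wc.1, wc.2) ∈ d.items := by simpa using hwc
  have := PySem.Dict.getD_of_mem_items d hmem h 0
  simp [Function.comp, this]

theorem ghA_fold_eq (inner : PySem.Dict String Int) (tag : String)
    (st : PySem.Dict String String × PySem.Dict String (List String) × List String)
    (h : inner.keys.Nodup) :
    inner.keys.foldl (ghA_step inner tag) st = (hapW inner).foldl (stepW tag) st := by
  have hrw : inner.keys.foldl (ghA_step inner tag) st
      = inner.keys.foldl
          (fun acc x => if (inner.getD x 0 == 1) = true then stepW tag acc x else acc) st := rfl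
  rw [hrw, PySem.List.foldl_if_eq_foldl_filter, haps_eq inner h]

theorem bpass_fold_eq (inner : PySem.Dict String Int) (tag : String)
    (fd : PySem.Dict String String × PySem.Set String) :
    inner.items.foldl (fun fd wc =>
        if wc.2 == 1 then
          if fd.1.contains wc.1 then (fd.1, PySem.Set.add fd.2 wc.1)
          else (fd.1.insert wc.1 tag, fd.2)
        else fd) fd
      = (hapW inner).foldl (step1 tag) fd := by
  have h1 := PySem.List.foldl_if_eq_foldl_filter (fun (wc : String × Int) => wc.2 == 1)
      (fun (fd : PySem.Dict String String × PySem.Set String) (wc : String × Int) =>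
        if fd.1.contains wc.1 then (fd.1, PySem.Set.add fd.2 wc.1)
        else (fd.1.insert wc.1 tag, fd.2))
      inner.items fd
  exact h1.trans (by unfold hapW; rw [List.foldl_map]; rfl)

theorem bfilter_eq (inner : PySem.Dict String Int) (f : PySem.Dict String String)
    (d : PySem.Set String) (t : String) :
    (inner.items.filter
        (fun wc => wc.2 == 1 && f.getD wc.1 "" == t && !(PySem.Set.contains d wc.1))).map Prod.fst
      = (hapW inner).filter (hcond f d t) := by
  unfold hapW hcond
  rw [List.filter_map, List.filter_filter]
  congr 1
  apply List.filter_congr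
  intro wc _
  by_cases h3 : wc.1 ∈ d
  · have hc : PySem.Set.contains d wc.1 = true := (PySem.Set.contains_iff _ _).mpr h3
    cases h1 : (wc.2 == 1) <;> cases h2 : (f.getD wc.1 "" == t) <;>
      simp [Function.comp, h2, h3]
  · have hc : PySem.Set.contains d wc.1 = false :=
      Bool.eq_false_iff.mpr (fun hcontr => h3 ((PySem.Set.contains_iff _ _).mp hcontr))
    cases h1 : (wc.2 == 1) <;> cases h2 : (f.getD wc.1 "" == t) <;>
      simp [Function.comp, h2, h3]

-- the invariant of A's inner loop against B's pass-1 loop --------------------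

theorem inner_invariant (L : List (String × List String)) (tag : String)
    (f : PySem.Dict String String) (d : PySem.Set String) (hs : PySem.Dict String (List String))
    (hLn : (L.map Prod.fst).Nodup) (hLsn : ∀ tw ∈ L, tw.2.Nodup)
    (hfact : ∀ w t, f.get? w = some t → ∃ vs, (t, vs) ∈ L ∧ w ∈ vs)
    (_hd : ∀ w, PySem.Set.contains d w = true → f.contains w = true)
    (hhs : hs.items = L.map (fun tw => (tw.1, tw.2.filter (hcond f d tw.1))))
    (ws : List String) (hws : ws.Nodup) :
    (ws.foldl (stepW tag) (f, hs, ([] : List String))).1 = (ws.foldl (step1 tag) (f, d)).1 ∧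
    (ws.foldl (stepW tag) (f, hs, ([] : List String))).2.2
        = ws.filter (fun w => !(f.contains w)) ∧
    (∀ x, (ws.foldl (step1 tag) (f, d)).1.get? x
        = if x ∈ ws ∧ f.contains x = false then some tag else f.get? x) ∧
    (∀ x, PySem.Set.contains (ws.foldl (step1 tag) (f, d)).2 x
        = (PySem.Set.contains d x || (decide (x ∈ ws) && f.contains x))) ∧
    (ws.foldl (stepW tag) (f, hs, ([] : List String))).2.1.items
        = L.map (fun tw => (tw.1,
            tw.2.filter (fun w => hcond f d tw.1 w && !(decide (w ∈ ws) && f.contains w)))) := by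
  induction ws using List.reverseRecOn with
  | nil =>
    refine ⟨rfl, by simp, by intro x; simp, by intro x; simp, ?_⟩
    simpa using hhs
  | append_singleton ws w ih =>
    rw [List.nodup_append] at hws
    obtain ⟨hws', hsing, hdisj⟩ := hws
    have hwnew : w ∉ ws := fun hmem => hdisj w hmem w (by simp) rfl
    obtain ⟨ih1, ih2, ih3, ih4, ih5⟩ := ih hws'
    set A1 := ws.foldl (stepW tag) (f, hs, ([] : List String)) with hA1def
    set B1 := ws.foldl (step1 tag) (f, d) with hB1def
    have hfoldA : (ws ++ [w]).foldl (stepW tag) (f, hs, ([] : List String)) = stepW tag A1 w := by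
      rw [List.foldl_append]; rfl
    have hfoldB : (ws ++ [w]).foldl (step1 tag) (f, d) = step1 tag B1 w := by
      rw [List.foldl_append]; rfl
    have hgw : B1.1.get? w = f.get? w := by rw [ih3]; simp [hwnew]
    have hcw : B1.1.contains w = f.contains w := by
      rw [PySem.Dict.contains_eq_isSome_get?, hgw, ← PySem.Dict.contains_eq_isSome_get?]
    have hAcw : A1.1.contains w = f.contains w := by rw [ih1]; exact hcw
    have hk : A1.2.1.keys = L.map Prod.fst := by
      rw [keys_eq_items_map, ih5, List.map_map]
      exact List.map_congr_left (fun tw _ => rfl)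
    have hknd : A1.2.1.keys.Nodup := by rw [hk]; exact hLn
    rw [hfoldA, hfoldB]
    cases hfw : f.contains w with
    | false =>
      have hstepA : stepW tag A1 w = (A1.1.insert w tag, A1.2.1, A1.2.2 ++ [w]) := by
        simp [stepW, hAcw, hfw]
      have hstepB : step1 tag B1 w = (B1.1.insert w tag, B1.2) := by
        simp [step1, hcw, hfw]
      rw [hstepA, hstepB]
      refine ⟨by rw [ih1], ?_, ?_, ?_, ?_⟩
      · rw [List.filter_append, ih2]; simp [hfw]
      · intro x
        rw [PySem.Dict.get?_insert]
        by_cases hxw : x = w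
        · subst hxw; simp [hfw]
        · rw [if_neg hxw, ih3]
          exact if_congr (by simp [hxw]) rfl rfl
      · intro x
        rw [ih4]
        by_cases hxw : x = w
        · subst hxw; simp [hfw, List.mem_append]
        · simp [List.mem_append, hxw]
      · rw [ih5]
        apply List.map_congr_left
        intro tw _
        refine congrArg (fun l => (tw.1, l)) (List.filter_congr ?_)
        intro x hx
        by_cases hxw : x = w
        · subst hxw; simp [hfw]
        · simp [hxw, List.mem_append]
    | true =>
      have hsome : ∃ t0, f.get? w = some t0 := by
        rw [PySem.Dict.contains_eq_isSome_get?] at hfw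
        exact Option.isSome_iff_exists.mp hfw
      obtain ⟨t0, ht0⟩ := hsome
      obtain ⟨vs, hvsL, hwvs⟩ := hfact w t0 ht0
      have hgetD : f.getD w "" = t0 := by rw [PySem.Dict.getD_eq_get?_getD, ht0]; rfl
      have hA1getD : A1.1.getD w "" = t0 := by
        rw [ih1, PySem.Dict.getD_eq_get?_getD, hgw, ht0]; rfl
      have hentry : (t0, vs.filter (fun x => hcond f d t0 x && !(decide (x ∈ ws) && f.contains x)))
          ∈ A1.2.1.items := by
        rw [ih5]; exact List.mem_map_of_mem hvsL
      have hlst : A1.2.1.getD t0 []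
          = vs.filter (fun x => hcond f d t0 x && !(decide (x ∈ ws) && f.contains x)) :=
        PySem.Dict.getD_of_mem_items _ hentry hknd []
      have hvsnd : vs.Nodup := hLsn _ hvsL
      have hstepB : step1 tag B1 w = (B1.1, PySem.Set.add B1.2 w) := by
        simp [step1, hcw, hfw]
      have hget?same : ∀ x, B1.1.get? x
          = if x ∈ ws ++ [w] ∧ f.contains x = false then some tag else f.get? x := by
        intro x
        rw [ih3]
        by_cases hxw : x = w
        · subst hxw; simp [hfw, hwnew]
        · exact if_congr (by simp [hxw]) rfl rfl
      have hdead : ∀ x, PySem.Set.contains (PySem.Set.add B1.2 w) x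
          = (PySem.Set.contains d x || (decide (x ∈ ws ++ [w]) && f.contains x)) := by
        intro x
        rw [contains_add_eq, ih4]
        by_cases hxw : x = w
        · subst hxw; simp [hfw, List.mem_append]
        · simp [hxw, List.mem_append]
      by_cases hdw : w ∈ d
      · -- w was already removed once: the membership test fails, nothing changes
        have hdc : PySem.Set.contains d w = true := (PySem.Set.contains_iff _ _).mpr hdw
        have hwnot : w ∉ A1.2.1.getD t0 [] := by
          rw [hlst, List.mem_filter]
          simp [hcond, hdw]
        have hstepA : stepW tag A1 w = A1 := by
          unfold stepW
          rw [hAcw, hfw]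
          simp [hA1getD, hwnot]
        rw [hstepA, hstepB]
        refine ⟨ih1, ?_, hget?same, hdead, ?_⟩
        · rw [List.filter_append, ih2]; simp [hfw]
        · rw [ih5]
          apply List.map_congr_left
          intro tw _
          refine congrArg (fun l => (tw.1, l)) (List.filter_congr ?_)
          intro x hx
          by_cases hxw : x = w
          · subst hxw; simp [hcond, hdw]
          · simp [hxw, List.mem_append]
      · -- the removal case: w is erased from its first tag's list
        have hdc : PySem.Set.contains d w = false :=
          Bool.eq_false_iff.mpr (fun hc => hdw ((PySem.Set.contains_iff _ _).mp hc))
        have hwin : w ∈ A1.2.1.getD t0 [] := by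
          rw [hlst, List.mem_filter]
          refine ⟨hwvs, ?_⟩
          simp [hcond, hgetD, hdw, hwnew]
        have hrem : PySem.List.remove? (A1.2.1.getD t0 []) w
            = some ((A1.2.1.getD t0 []).erase w) :=
          PySem.List.remove?_eq_some_erase _ _ hwin
        have hstepA : stepW tag A1 w
            = (A1.1, A1.2.1.insert t0 ((A1.2.1.getD t0 []).erase w), A1.2.2) := by
          unfold stepW
          rw [hAcw, hfw]
          simp [hA1getD, hwin, hrem]
        have ht0mem : t0 ∈ A1.2.1.keys := by
          rw [hk]
          simpa using List.mem_map_of_mem (f := Prod.fst) hvsL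
        have ht0c : A1.2.1.contains t0 = true :=
          (PySem.Dict.contains_iff_mem_keys _ _).mpr ht0mem
        rw [hstepA, hstepB]
        refine ⟨ih1, ?_, hget?same, hdead, ?_⟩
        · rw [List.filter_append, ih2]; simp [hfw]
        · rw [PySem.Dict.items_insert_of_contains _ _ ht0c, ih5, List.map_map]
          apply List.map_congr_left
          intro tw htw
          simp only [Function.comp_apply]
          by_cases htww : tw.1 = t0
          · have htwmem : (t0, tw.2) ∈ L := by rw [← htww]; exact htw
            have hvs : tw.2 = vs := snd_unique L hLn htwmem hvsL
            rw [if_pos (by simp [htww]), htww, hvs]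
            refine congrArg (fun l => (t0, l)) ?_
            rw [hlst, (hvsnd.filter _).erase_eq_filter, List.filter_filter]
            apply List.filter_congr
            intro x hx
            by_cases hxw : x = w
            · subst hxw; simp [hcond, List.mem_append, hfw]
            · simp [hxw, List.mem_append]
          · rw [if_neg (by simp [htww])]
            refine congrArg (fun l => (tw.1, l)) (List.filter_congr ?_)
            intro x hx
            by_cases hxw : x = w
            · subst hxw
              have hbt : (f.getD x "" == tw.1) = false := by
                rw [hgetD]
                exact beq_eq_false_iff_ne.mpr (fun h => htww h.symm)
              simp [hcond, hbt]
            · simp [hxw, List.mem_append]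

-- the outer invariant ---------------------------------------------------------

theorem main_invariant (L : List (String × List String))
    (h1 : (L.map Prod.fst).Nodup) (h2 : ∀ tw ∈ L, tw.2.Nodup) :
    (afold L).1 = (pass1 L).1 ∧
    (afold L).2.items = model L ∧
    (∀ w t, (pass1 L).1.get? w = some t → ∃ ws, (t, ws) ∈ L ∧ w ∈ ws) ∧
    (∀ w, (pass1 L).1.contains w = true ↔ ∃ tw ∈ L, w ∈ tw.2) ∧
    (∀ w, PySem.Set.contains (pass1 L).2 w = true → (pass1 L).1.contains w = true) := by
  induction L using List.reverseRecOn with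
  | nil =>
    refine ⟨rfl, rfl, ?_, ?_, ?_⟩
    · intro w t h; simp [pass1] at h
    · intro w; simp [pass1]
    · intro w h; simp [pass1, PySem.Set.empty] at h
  | append_singleton L e ihL =>
    rw [List.map_append, List.nodup_append] at h1
    obtain ⟨h1', hsing, hdisj⟩ := h1
    have htag : e.1 ∉ L.map Prod.fst := fun hmem => hdisj _ hmem e.1 (by simp) rfl
    have h2' : ∀ tw ∈ L, tw.2.Nodup := fun tw h => h2 tw (List.mem_append_left _ h)
    have hend : e.2.Nodup := h2 e (List.mem_append_right _ (by simp))
    obtain ⟨ih1, ih2, ih3, ih4, ih5⟩ := ihL h1' h2'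
    set F := (pass1 L).1 with hF
    set D := (pass1 L).2 with hD
    have hhsL : (afold L).2.items = L.map (fun tw => (tw.1, tw.2.filter (hcond F D tw.1))) := by
      rw [ih2]; rfl
    obtain ⟨j1, j2, j3, j4, j5⟩ :=
      inner_invariant L e.1 F D (afold L).2 h1' h2' ih3 ih5 hhsL e.2 hend
    set R := e.2.foldl (stepW e.1) (F, (afold L).2, ([] : List String)) with hR
    set P := e.2.foldl (step1 e.1) (F, D) with hP
    have hstep : afold (L ++ [e]) = stepT (afold L) e := by
      unfold afold
      rw [List.foldl_append]
      simp only [List.foldl_cons, List.foldl_nil]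
    have hstep2 : stepT (afold L) e = (R.1, R.2.1.insert e.1 R.2.2) := by
      unfold stepT
      rw [ih1]
    have hB' : pass1 (L ++ [e]) = P := by
      unfold pass1
      rw [List.foldl_append]
      rfl
    have hkR : R.2.1.keys = L.map Prod.fst := by
      rw [keys_eq_items_map, j5, List.map_map]
      exact List.map_congr_left (fun tw _ => rfl)
    have hcE : R.2.1.contains e.1 = false :=
      Bool.eq_false_iff.mpr (fun hc => htag (hkR ▸ (PySem.Dict.contains_iff_mem_keys _ _).mp hc))
    have hPc : ∀ w, P.1.contains w = (decide (w ∈ e.2) || F.contains w) := by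
      intro w
      rw [PySem.Dict.contains_eq_isSome_get?, j3]
      by_cases hmem : w ∈ e.2 <;> cases hfx : F.contains w <;>
        simp [hmem, hfx, ← PySem.Dict.contains_eq_isSome_get?]
    refine ⟨?_, ?_, ?_, ?_, ?_⟩
    · rw [hstep, hstep2, hB']
      exact j1
    · rw [hstep, hstep2]
      unfold model
      rw [hB', PySem.Dict.items_insert_of_not_contains _ _ hcE, j5, j2]
      simp only [List.map_append, List.map_cons, List.map_nil]
      congr 1
      · apply List.map_congr_left
        intro tw htw
        refine congrArg (fun l => (tw.1, l)) ?_
        apply List.filter_congr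
        intro x hx
        have hfx : F.contains x = true := (ih4 x).mpr ⟨tw, htw, hx⟩
        have hgx : P.1.getD x "" = F.getD x "" := by
          rw [PySem.Dict.getD_eq_get?_getD, PySem.Dict.getD_eq_get?_getD, j3]
          simp [hfx]
        simp only [hcond]
        rw [hgx, j4 x, hfx]
        cases hb1 : (F.getD x "" == tw.1) <;> cases hb2 : PySem.Set.contains D x <;>
          cases hb3 : decide (x ∈ e.2) <;> rfl
      · refine congrArg (fun l => [(e.1, l)]) ?_
        apply List.filter_congr
        intro x hx
        cases hfx : F.contains x with
        | false =>
          have hgx : P.1.get? x = some e.1 := by rw [j3]; simp [hx, hfx]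
          have hdx : PySem.Set.contains D x = false :=
            Bool.eq_false_iff.mpr (fun hc => by rw [ih5 x hc] at hfx; cases hfx)
          simp only [hcond]
          rw [PySem.Dict.getD_eq_get?_getD, hgx, j4 x, hdx, hfx]
          simp
        | true =>
          have hsome : ∃ t0, F.get? x = some t0 := by
            rw [PySem.Dict.contains_eq_isSome_get?] at hfx
            exact Option.isSome_iff_exists.mp hfx
          obtain ⟨t0, ht0⟩ := hsome
          obtain ⟨vs, hvsL, _⟩ := ih3 x t0 ht0
          have ht0mem : t0 ∈ L.map Prod.fst := by
            simpa using List.mem_map_of_mem (f := Prod.fst) hvsL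
          have hne : (t0 == e.1) = false :=
            beq_eq_false_iff_ne.mpr (fun h => htag (h ▸ ht0mem))
          have hgx : P.1.getD x "" = t0 := by
            rw [PySem.Dict.getD_eq_get?_getD, j3]
            simp [hfx, ht0]
          simp only [hcond]
          rw [hgx, hne]
          simp
    · intro w t h
      rw [hB', j3] at h
      by_cases hc : w ∈ e.2 ∧ F.contains w = false
      · rw [if_pos hc] at h
        obtain rfl : e.1 = t := Option.some_inj.mp h
        exact ⟨e.2, List.mem_append_right _ (by simp), hc.1⟩
      · rw [if_neg hc] at h
        obtain ⟨vs, hvsL, hwv⟩ := ih3 w t h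
        exact ⟨vs, List.mem_append_left _ hvsL, hwv⟩
    · intro w
      rw [hB', hPc w]
      simp only [Bool.or_eq_true, decide_eq_true_eq]
      rw [ih4 w]
      constructor
      · rintro (h | ⟨tw, htw, hw⟩)
        · exact ⟨e, List.mem_append_right _ (by simp), h⟩
        · exact ⟨tw, List.mem_append_left _ htw, hw⟩
      · rintro ⟨tw, htw, hw⟩
        rcases List.mem_append.mp htw with h | h
        · exact Or.inr ⟨tw, h, hw⟩
        · have he : tw = e := by simpa using h
          subst he
          exact Or.inl hw
    · intro w h
      rw [hB'] at h ⊢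
      rw [j4 w] at h
      rw [hPc w]
      rcases Bool.or_eq_true_iff.mp h with h' | h'
      · have := ih5 w h'
        simp [this]
      · have := (Bool.and_eq_true_iff.mp h').2
        simp [this]

-- plumbing for the final assembly ------------------------------------------

theorem T_inner_nodup (twt : List (String × List (String × Int))) (k : String) :
    ((PySem.Dict.ofList (twt.map (fun p => (p.1, PySem.Dict.ofList p.2)))).getD
        k PySem.Dict.empty).keys.Nodup := by
  set T := PySem.Dict.ofList (twt.map (fun p => (p.1, PySem.Dict.ofList p.2))) with hT
  cases hk : T.get? k with
  | none =>
    rw [PySem.Dict.getD_eq_get?_getD, hk]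
    simp [PySem.Dict.empty, keys_eq_items_map]
  | some v =>
    rw [PySem.Dict.getD_eq_get?_getD, hk]
    have hmem : (k, v) ∈ T.items := PySem.Dict.mem_items_of_get?_eq_some T hk
    have hmem' := mem_items_ofList _ _ hmem
    obtain ⟨p, _, hp⟩ := List.mem_map.mp hmem'
    have hv : v = PySem.Dict.ofList p.2 := ((Prod.ext_iff.mp hp).2).symm
    show v.keys.Nodup
    rw [hv]
    exact PySem.Dict.nodup_keys_ofList _

-- ===== VERDICT (by name: the statement is the Claim_ definition above) =====
theorem get_hapax_spec : Claim_equal_get_hapax := by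
  unfold Claim_equal_get_hapax
  intro twt _
  unfold Spec_get_hapax
  simp only [get_hapax, get_hapax_alt]
  set T := PySem.Dict.ofList (twt.map (fun p => (p.1, PySem.Dict.ofList p.2))) with hT
  set LL := T.items.map (fun tw => (tw.1, hapW tw.2)) with hLL
  have hTnd : T.keys.Nodup := PySem.Dict.nodup_keys_ofList _
  have hLn : (LL.map Prod.fst).Nodup := by
    rw [hLL, List.map_map]
    have he : T.items.map (Prod.fst ∘ (fun tw => (tw.1, hapW tw.2)))
        = T.items.map Prod.fst := List.map_congr_left (fun _ _ => rfl)
    rw [he, ← keys_eq_items_map]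
    exact hTnd
  have hLsn : ∀ tw ∈ LL, tw.2.Nodup := by
    intro tw htw
    rw [hLL] at htw
    obtain ⟨tw0, htw0, rfl⟩ := List.mem_map.mp htw
    have hmem' := mem_items_ofList _ _ htw0
    obtain ⟨p, _, hp⟩ := List.mem_map.mp hmem'
    have hv : tw0.2 = PySem.Dict.ofList p.2 := ((Prod.ext_iff.mp hp).2).symm
    exact hapW_nodup _ (by rw [hv]; exact PySem.Dict.nodup_keys_ofList _)
  obtain ⟨m1, m2, m3, m4, m5⟩ := main_invariant LL hLn hLsn
  have hAfold : T.keys.foldl (fun st tag =>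
        let r := (T.getD tag PySem.Dict.empty).keys.foldl
                   (ghA_step (T.getD tag PySem.Dict.empty) tag) (st.1, st.2, ([] : List String))
        (r.1, (r.2.1).insert tag r.2.2))
      ((PySem.Dict.empty : PySem.Dict String String),
       (PySem.Dict.empty : PySem.Dict String (List String)))
      = afold LL := by
    unfold afold
    rw [hLL, PySem.Dict.items_eq_map_keys T hTnd PySem.Dict.empty, List.map_map, List.foldl_map]
    refine PySem.List.foldl_congr_mem _ _ _ _ ?_
    intro st k _
    show _ = stepT st (k, hapW (T.getD k PySem.Dict.empty))
    unfold stepT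
    rw [ghA_fold_eq _ _ _ (T_inner_nodup twt k)]
  rw [hAfold]
  have hBfd : T.items.foldl (fun (fd : PySem.Dict String String × PySem.Set String) tw =>
        tw.2.items.foldl (fun fd wc =>
          if wc.2 == 1 then
            if fd.1.contains wc.1 then (fd.1, PySem.Set.add fd.2 wc.1)
            else (fd.1.insert wc.1 tw.1, fd.2)
          else fd) fd)
      ((PySem.Dict.empty : PySem.Dict String String), (PySem.Set.empty : PySem.Set String))
      = pass1 LL := by
    unfold pass1
    rw [hLL, List.foldl_map]
    refine PySem.List.foldl_congr_mem _ _ _ _ ?_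
    intro fd tw _
    exact bpass_fold_eq tw.2 tw.1 fd
  rw [hBfd]
  have hBmap : T.items.map (fun tw =>
        (tw.1, (tw.2.items.filter
            (fun wc => wc.2 == 1 && (pass1 LL).1.getD wc.1 "" == tw.1
                && !(PySem.Set.contains (pass1 LL).2 wc.1))).map Prod.fst))
      = model LL := by
    unfold model
    rw [hLL, List.map_map]
    apply List.map_congr_left
    intro tw _
    exact congrArg (fun l => (tw.1, l)) (bfilter_eq tw.2 _ _ tw.1)
  rw [hBmap, m2]
  have hkA : (afold LL).2.keys = LL.map Prod.fst := by
    rw [keys_eq_items_map, m2]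
    unfold model
    rw [List.map_map]
    exact List.map_congr_left (fun tw _ => rfl)
  have hknd : (afold LL).2.keys.Nodup := by rw [hkA]; exact hLn
  have hcitems : ((afold LL).2.keys.foldl
        (fun hc tag => hc.insert tag (((afold LL).2.getD tag []).length : Int))
        (PySem.Dict.empty : PySem.Dict String Int)).items
      = (afold LL).2.items.map (fun p => (p.1, (p.2.length : Int))) := by
    have h := PySem.Dict.items_foldl_insert_fresh (afold LL).2.keys (fun t => t)
        (fun t => (((afold LL).2.getD t []).length : Int)) PySem.Dict.empty
        (fun a _ => by simp) (by simpa using hknd)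
    refine h.trans ?_
    rw [PySem.Dict.items_eq_map_keys _ hknd ([] : List String), List.map_map]
    have hemp : (PySem.Dict.empty : PySem.Dict String Int).items = [] := rfl
    rw [hemp, List.nil_append]
    exact List.map_congr_left (fun a _ => rfl)
  rw [hcitems, m2]
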